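-- pv_equiv track=rewrite | github.com/heyhenry/python-problemsolving | November_2023/lang_creation/first_work/simple_lang_v2.py | remove_operand_from_string
-- ===== SOURCE A (Python) =====
-- def remove_operand_from_string(s:str):
--
--     result = ''
--
--     for c in range(len(s)):
--         if s[c] == '*':
--             result = s[:c] + s[c+1:]
--         if s[c] == '-':
--             result = s[:c] + s[c+1:]
--         if s[c] == '+':
--             result = s[:c] + s[c+1:]
--         if s[c] == '/':
--             result = s[:c] + s[c+1:]
--
--     return result
-- ===== SOURCE B (Python) =====
-- def remove_operand_from_string(s: str):
--     idx = max(s.rfind('+'), s.rfind('-'), s.rfind('*'), s.rfind('/'))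
--     if idx == -1:
--         return ''
--     return s[:idx] + s[idx+1:]
-- ===== Notes on version B (the rewrite author's own statement) =====
-- stated objective: faster
-- what changed: Replaces the per-character forward scan that rebuilds the whole string at every operator hit with four right-to-left rfind searches combined by max and a single slice (keeping A's empty-string result when no operator occurs).
import Mathlib
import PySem

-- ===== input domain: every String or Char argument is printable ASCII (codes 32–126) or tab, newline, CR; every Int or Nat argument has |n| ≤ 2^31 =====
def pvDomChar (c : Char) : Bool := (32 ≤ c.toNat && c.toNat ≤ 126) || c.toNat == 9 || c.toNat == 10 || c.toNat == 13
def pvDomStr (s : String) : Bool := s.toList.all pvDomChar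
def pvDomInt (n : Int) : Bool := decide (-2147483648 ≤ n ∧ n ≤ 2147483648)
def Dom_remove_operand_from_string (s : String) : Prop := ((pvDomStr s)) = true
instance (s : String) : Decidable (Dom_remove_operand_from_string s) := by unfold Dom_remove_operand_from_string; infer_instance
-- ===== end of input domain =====

-- B replaces A's forward per-character scan (which rebuilds the string at every operator hit)
-- by four right-to-left rfind searches combined with max and one slice; objective: simpler.

-- ===== PORT A =====
def remove_operand_from_string (s : String) : String :=
  let cs := s.toList
  let result : List Char :=
    (PySem.List.pyRange 0 (cs.length : Int) 1).foldl (fun result c =>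
      let result := if PySem.List.pyGetD cs c ' ' = '*' then
          PySem.List.slice cs none (some c) ++ PySem.List.slice cs (some (c + 1)) none else result
      let result := if PySem.List.pyGetD cs c ' ' = '-' then
          PySem.List.slice cs none (some c) ++ PySem.List.slice cs (some (c + 1)) none else result
      let result := if PySem.List.pyGetD cs c ' ' = '+' then
          PySem.List.slice cs none (some c) ++ PySem.List.slice cs (some (c + 1)) none else result
      let result := if PySem.List.pyGetD cs c ' ' = '/' then
          PySem.List.slice cs none (some c) ++ PySem.List.slice cs (some (c + 1)) none else result
      result) []
  String.ofList result

-- ===== PORT B =====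
def remove_operand_from_string_alt (s : String) : String :=
  let idx := max (max (max (PySem.Str.rfind s "+") (PySem.Str.rfind s "-"))
      (PySem.Str.rfind s "*")) (PySem.Str.rfind s "/")
  if idx = -1 then ""
  else String.ofList (PySem.List.slice s.toList none (some idx) ++
        PySem.List.slice s.toList (some (idx + 1)) none)

-- ===== PRECONDITION & SPEC =====
def Spec_remove_operand_from_string (s : String) (out : String) : Prop := out = remove_operand_from_string_alt s
instance (s : String) (out : String) : Decidable (Spec_remove_operand_from_string s out) := by unfold Spec_remove_operand_from_string; infer_instance

-- ===== CLAIM (what is proved, stated in full; the proofs are below) =====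
def Claim_equal_remove_operand_from_string : Prop := ∀ (s : String), Dom_remove_operand_from_string s → Spec_remove_operand_from_string s (remove_operand_from_string s)

-- ===== LEMMAS AND PROOFS =====

/-- The string with the character at (nonnegative) index `i` removed, as both ports build it. -/
def pvDel (cs : List Char) (i : Int) : List Char :=
  PySem.List.slice cs none (some i) ++ PySem.List.slice cs (some (i + 1)) none

/-- Largest `j < n` with `P j`, as an `Int`, `-1` if none. -/
def pvMaxIdx (P : Nat → Bool) : Nat → Int
  | 0 => -1
  | n + 1 => if P n then (n : Int) else pvMaxIdx P n

lemma pvMaxIdx_lt (P : Nat → Bool) (n : Nat) : -1 ≤ pvMaxIdx P n ∧ pvMaxIdx P n < n := by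
  induction n with
  | zero => simp [pvMaxIdx]
  | succ n ih =>
    simp only [pvMaxIdx]
    split_ifs <;> push_cast <;> omega

lemma pvGo_eq (cs sub : List Char) (n : Nat) :
    PySem.Chars.rfind.go cs sub n = pvMaxIdx (fun j => sub.isPrefixOf (cs.drop j)) (n + 1) := by
  induction n with
  | zero => simp [PySem.Chars.rfind.go, pvMaxIdx]
  | succ n ih => simp [PySem.Chars.rfind.go, pvMaxIdx, ih]

lemma pvPrefix_singleton (cs : List Char) (c : Char) (j : Nat) :
    [c].isPrefixOf (cs.drop j) = (cs[j]? == some c) := by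
  have h0 : cs[j]? = (cs.drop j)[0]? := by
    rw [List.getElem?_drop]; simp
  rw [h0]
  cases h : cs.drop j with
  | nil => simp [List.isPrefixOf]
  | cons a t => simp [List.isPrefixOf, BEq.comm]

lemma pvRfind_eq (cs : List Char) (c : Char) :
    PySem.Chars.rfind cs [c] = pvMaxIdx (fun j => cs[j]? == some c) cs.length := by
  have hP : (fun j => ([c].isPrefixOf (cs.drop j) : Bool)) = (fun j => (cs[j]? == some c)) := by
    funext j; exact pvPrefix_singleton cs c j
  calc PySem.Chars.rfind cs [c]
      = pvMaxIdx (fun j => [c].isPrefixOf (cs.drop j)) (cs.length + 1) := pvGo_eq cs [c] cs.length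
    _ = pvMaxIdx (fun j => cs[j]? == some c) (cs.length + 1) := by rw [hP]
    _ = pvMaxIdx (fun j => cs[j]? == some c) cs.length := by
        simp [pvMaxIdx]

lemma pvMaxIdx_or (p q : Nat → Bool) (n : Nat) :
    pvMaxIdx (fun j => p j || q j) n = max (pvMaxIdx p n) (pvMaxIdx q n) := by
  induction n with
  | zero => simp [pvMaxIdx]
  | succ n ih =>
    have hp := pvMaxIdx_lt p n
    have hq := pvMaxIdx_lt q n
    simp only [pvMaxIdx, ih]
    cases hpn : p n <;> cases hqn : q n <;> simp <;> omega

/-- The per-index predicate both sides compute: index holds one of the four operators,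
    grouped to match B's max-nesting. -/
def pvPop (cs : List Char) (j : Nat) : Bool :=
  (((cs[j]? == some '+') || (cs[j]? == some '-')) || (cs[j]? == some '*')) || (cs[j]? == some '/')

lemma pvFoldA (cs : List Char) (n : Nat) (hn : n ≤ cs.length) :
    (PySem.List.pyRange 0 (n : Int) 1).foldl (fun result c =>
      let result := if PySem.List.pyGetD cs c ' ' = '*' then pvDel cs c else result
      let result := if PySem.List.pyGetD cs c ' ' = '-' then pvDel cs c else result
      let result := if PySem.List.pyGetD cs c ' ' = '+' then pvDel cs c else result
      let result := if PySem.List.pyGetD cs c ' ' = '/' then pvDel cs c else result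
      result) []
    = (if pvMaxIdx (pvPop cs) n = -1 then [] else pvDel cs (pvMaxIdx (pvPop cs) n)) := by
  induction n with
  | zero => simp [pvMaxIdx, PySem.List.pyRange]
  | succ n ih =>
    have hn' : n ≤ cs.length := Nat.le_of_succ_le hn
    have hcast : ((n + 1 : Nat) : Int) = (n : Int) + 1 := by push_cast; ring
    rw [hcast, PySem.List.pyRange_one_succ_right (by positivity), List.foldl_append,
      ih hn', List.foldl_cons, List.foldl_nil]
    have hget : PySem.List.pyGetD cs (n : Int) ' ' = cs.getD n ' ' := PySem.List.pyGetD_natCast cs n ' '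
    have hlt : n < cs.length := hn
    have hsome : cs[n]? = some cs[n] := List.getElem?_eq_getElem hlt
    have hgd : cs.getD n ' ' = cs[n] := by simp [List.getD, hsome]
    have hbound := pvMaxIdx_lt (pvPop cs) n
    simp only [hget, hgd, pvMaxIdx, pvPop, hsome]
    by_cases h1 : cs[n] = '*' <;> by_cases h2 : cs[n] = '-' <;> by_cases h3 : cs[n] = '+'
      <;> by_cases h4 : cs[n] = '/' <;>
    simp_all

-- ===== VERDICT (by name: the statement is the Claim_ definition above) =====
theorem remove_operand_from_string_spec : Claim_equal_remove_operand_from_string := by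
  intro s _
  unfold Spec_remove_operand_from_string remove_operand_from_string remove_operand_from_string_alt
  set cs := s.toList with hcs
  have hplus : PySem.Str.rfind s "+" = pvMaxIdx (fun j => cs[j]? == some '+') cs.length := by
    rw [PySem.Str.rfind_eq]; exact pvRfind_eq cs '+'
  have hminus : PySem.Str.rfind s "-" = pvMaxIdx (fun j => cs[j]? == some '-') cs.length := by
    rw [PySem.Str.rfind_eq]; exact pvRfind_eq cs '-'
  have hstar : PySem.Str.rfind s "*" = pvMaxIdx (fun j => cs[j]? == some '*') cs.length := by
    rw [PySem.Str.rfind_eq]; exact pvRfind_eq cs '*'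
  have hslash : PySem.Str.rfind s "/" = pvMaxIdx (fun j => cs[j]? == some '/') cs.length := by
    rw [PySem.Str.rfind_eq]; exact pvRfind_eq cs '/'
  have hmax : max (max (max (PySem.Str.rfind s "+") (PySem.Str.rfind s "-"))
      (PySem.Str.rfind s "*")) (PySem.Str.rfind s "/")
      = pvMaxIdx (pvPop cs) cs.length := by
    rw [hplus, hminus, hstar, hslash]
    have : pvPop cs = fun j =>
        (((fun j => (cs[j]? == some '+')) j || (fun j => (cs[j]? == some '-')) j)
          || (fun j => (cs[j]? == some '*')) j) || (fun j => (cs[j]? == some '/')) j := rfl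
    rw [this, pvMaxIdx_or, pvMaxIdx_or, pvMaxIdx_or]
  have hfold := pvFoldA cs cs.length le_rfl
  simp only [pvDel] at hfold
  simp only [hfold, hmax]
  split_ifs with h
  · rfl
  · rfl
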